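-- pv_equiv track=rewrite | github.com/ariel-zilber/chess_improments_patterns | src/features/move_features.py | count_mistakes
-- ===== SOURCE A (Python) =====
-- def count_mistakes(score_diff_list,white):
--     if white:
--         m=0
--     else:
--         m=1
--
--     return len([score_diff_list[i] for i in range(len(score_diff_list)) if score_diff_list[i]>=100 \
--                 and score_diff_list[i]<300 \
--                     and i%2 ==m])
-- ===== SOURCE B (Python) =====
-- def count_mistakes(score_diff_list, white):
--     m = 0 if white else 1
--     return sum(1 for x in score_diff_list[m::2] if 100 <= x < 300)
-- ===== Notes on version B (the rewrite author's own statement) =====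
-- stated objective: simpler
-- what changed: Replaces the index-by-index parity test inside the comprehension by a stride slice score_diff_list[m::2] that selects the parity positions, followed by a plain count of the in-range values.
import Mathlib
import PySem

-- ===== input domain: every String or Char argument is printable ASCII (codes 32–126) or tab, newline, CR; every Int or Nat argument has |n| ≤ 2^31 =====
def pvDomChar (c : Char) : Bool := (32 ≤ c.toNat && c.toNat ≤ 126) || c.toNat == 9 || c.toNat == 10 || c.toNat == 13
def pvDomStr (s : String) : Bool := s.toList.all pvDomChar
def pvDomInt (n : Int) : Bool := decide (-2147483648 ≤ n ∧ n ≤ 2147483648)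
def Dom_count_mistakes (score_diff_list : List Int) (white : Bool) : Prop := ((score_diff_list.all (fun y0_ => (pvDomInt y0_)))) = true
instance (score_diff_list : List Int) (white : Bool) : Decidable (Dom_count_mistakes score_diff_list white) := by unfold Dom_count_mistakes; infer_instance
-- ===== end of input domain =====

-- B replaces the per-index parity test of A's comprehension by a stride slice [m::2]
-- followed by a plain count of the in-range values (objective: simpler).

-- ===== PORT A =====
def count_mistakes (score_diff_list : List Int) (white : Bool) : Int :=
  let m : Int := if white then 0 else 1
  ((((PySem.List.pyRange 0 (score_diff_list.length : Int) 1).filter (fun i =>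
        decide (100 ≤ PySem.List.pyGetD score_diff_list i 0) &&
        decide (PySem.List.pyGetD score_diff_list i 0 < 300) &&
        decide (PySem.Int.mod i 2 = m))).map
      (fun i => PySem.List.pyGetD score_diff_list i 0)).length : Int)

-- ===== PORT B =====
def count_mistakes_alt (score_diff_list : List Int) (white : Bool) : Int :=
  let m : Int := if white then 0 else 1
  -- score_diff_list[m::2]; the step 2 is nonzero, so slice? always returns some
  let sub := (PySem.List.slice? score_diff_list (some m) none 2).getD []
  sub.foldl (fun acc x => acc + (if 100 ≤ x ∧ x < 300 then 1 else 0)) 0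

-- ===== PRECONDITION & SPEC =====
def Spec_count_mistakes (score_diff_list : List Int) (white : Bool) (out : Int) : Prop := out = count_mistakes_alt score_diff_list white
instance (score_diff_list : List Int) (white : Bool) (out : Int) : Decidable (Spec_count_mistakes score_diff_list white out) := by unfold Spec_count_mistakes; infer_instance

-- ===== CLAIM (what is proved, stated in full; the proofs are below) =====
def Claim_equal_count_mistakes : Prop := ∀ (score_diff_list : List Int) (white : Bool), Dom_count_mistakes score_diff_list white → Spec_count_mistakes score_diff_list white (count_mistakes score_diff_list white)

-- ===== LEMMAS AND PROOFS =====

/-- Every-other-element of a list (the `[::2]` stride). Proof helper. -/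
def everyOther {α : Type} : List α → List α
  | [] => []
  | [a] => [a]
  | a :: _ :: t => a :: everyOther t

theorem everyOther_cons {α : Type} (x : α) (t : List α) :
    everyOther (x :: t) = x :: everyOther (t.drop 1) := by
  cases t <;> rfl

theorem getElem?_everyOther {α : Type} (xs : List α) (k : Nat) :
    (everyOther xs)[k]? = xs[2 * k]? := by
  induction xs using everyOther.induct generalizing k with
  | case1 => simp [everyOther]
  | case2 a =>
      cases k with
      | zero => simp [everyOther]
      | succ k => simp [everyOther]
  | case3 a b t ih =>
      cases k with
      | zero => simp [everyOther]
      | succ k =>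
          simp only [everyOther, List.getElem?_cons_succ, ih]
          have h : 2 * (k + 1) = (2 * k + 1) + 1 := by omega
          rw [h, List.getElem?_cons_succ, List.getElem?_cons_succ]

/-- `l[m::2]` as computed by `slice?` is `everyOther (l.drop m)`. -/
theorem slice?_step2 {α : Type} (l : List α) (m : Nat) :
    PySem.List.slice? l (some (m : Int)) none 2 = some (everyOther (l.drop m)) := by
  have hstep0 : ((2:Int) = 0) = False := by norm_num
  have hstepneg : ((2:Int) < 0) = False := by norm_num
  have hmneg : (((m:Nat):Int) < 0) = False := by simp
  simp only [PySem.List.slice?, PySem.List.sliceIndices, hstep0, hstepneg, hmneg, if_false]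
  by_cases hm : l.length ≤ m
  · have hmin : min ((m:Nat):Int) ((l.length : Nat):Int) = ((l.length : Nat):Int) := by omega
    rw [hmin, if_pos (by norm_num : (0:Int) < 2), if_neg (by omega : ¬ ((l.length:Int) < (l.length:Int)))]
    simp [List.drop_eq_nil_of_le hm, everyOther]
  · push_neg at hm
    have hmin : min ((m:Nat):Int) ((l.length : Nat):Int) = ((m:Nat):Int) := by omega
    rw [hmin, if_pos (by norm_num : (0:Int) < 2), if_pos (by exact_mod_cast hm : ((m:Nat):Int) < ((l.length:Nat):Int))]
    set c : Nat := (((l.length:Int) - (m:Int) + 2 - 1) / 2).toNat with hc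
    have hcval : c = (l.length - m + 1) / 2 := by omega
    have hlt : ∀ k, k < c → m + 2 * k < l.length := by omega
    have d : α := l[m]'hm
    have hf : ∀ k ∈ List.range c,
        (fun k : Nat => l[((m:Int) + 2 * (k:Int)).toNat]?) k
          = (some ∘ fun k : Nat => l.getD (m + 2 * k) d) k := by
      intro k hk
      rw [List.mem_range] at hk
      have hidx : ((m:Int) + 2 * (k:Int)).toNat = m + 2 * k := by omega
      have hl := hlt k hk
      simp only [Function.comp, hidx, List.getElem?_eq_getElem hl, List.getD_eq_getElem l d hl]
    rw [List.filterMap_congr hf, List.filterMap_eq_map]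
    congr 1
    apply List.ext_getElem?
    intro i
    rw [getElem?_everyOther, List.getElem?_drop, List.getElem?_map]
    by_cases hi : i < c
    · have hl := hlt i hi
      rw [List.getElem?_range hi, Option.map_some, List.getElem?_eq_getElem hl,
        List.getD_eq_getElem l d hl]
    · have hge : l.length ≤ m + 2 * i := by omega
      rw [List.getElem?_eq_none (l := List.range c) (by simpa using Nat.le_of_not_lt hi),
        List.getElem?_eq_none hge, Option.map_none]

theorem foldl_count (xs : List Int) (c : Int) :
    xs.foldl (fun acc x => acc + (if 100 ≤ x ∧ x < 300 then 1 else 0)) c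
      = c + (xs.countP (fun x => decide (100 ≤ x ∧ x < 300)) : Int) := by
  induction xs generalizing c with
  | nil => simp
  | cons x t ih =>
      simp only [List.foldl_cons, List.countP_cons, ih]
      by_cases h : 100 ≤ x ∧ x < 300 <;> simp [h] <;> push_cast <;> ring

/-- Main counting lemma: A's index-filtered count equals the count over the stride sublist. -/
theorem main_count (l : List Int) (m : Nat) (hm : m = 0 ∨ m = 1) :
    (List.range l.length).countP
        (fun i => decide (100 ≤ l.getD i 0) && decide (l.getD i 0 < 300) && decide (i % 2 = m))
      = (everyOther (l.drop m)).countP (fun x => decide (100 ≤ x ∧ x < 300)) := by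
  induction l generalizing m with
  | nil => rcases hm with h | h <;> subst h <;> simp [everyOther]
  | cons x t ih =>
      rw [List.length_cons, List.range_succ_eq_map, List.countP_cons, List.countP_map]
      rcases hm with h | h
      · subst h
        have hfun : ((fun i => decide (100 ≤ (x :: t).getD i 0) && decide ((x :: t).getD i 0 < 300) && decide (i % 2 = 0)) ∘ Nat.succ)
            = (fun i => decide (100 ≤ t.getD i 0) && decide (t.getD i 0 < 300) && decide (i % 2 = 1)) := by
          funext i
          simp only [Function.comp, List.getD_cons_succ]
          congr 1
          rw [decide_eq_decide]
          omega
        rw [hfun, ih 1 (Or.inr rfl), List.drop_zero, everyOther_cons, List.countP_cons]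
        congr 1
        simp only [List.getD_cons_zero]
        by_cases hx : 100 ≤ x ∧ x < 300
        · simp [hx.1, hx.2]
        · rcases (not_and_or.mp hx) with h' | h' <;> simp [h', hx]
      · subst h
        have hfun : ((fun i => decide (100 ≤ (x :: t).getD i 0) && decide ((x :: t).getD i 0 < 300) && decide (i % 2 = 1)) ∘ Nat.succ)
            = (fun i => decide (100 ≤ t.getD i 0) && decide (t.getD i 0 < 300) && decide (i % 2 = 0)) := by
          funext i
          simp only [Function.comp, List.getD_cons_succ]
          congr 1
          rw [decide_eq_decide]
          omega
        rw [hfun, ih 0 (Or.inl rfl)]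
        simp [everyOther]

theorem ports_agree (l : List Int) (m : Nat) (hm : m = 0 ∨ m = 1) :
    ((((PySem.List.pyRange 0 (l.length : Int) 1).filter (fun i =>
          decide (100 ≤ PySem.List.pyGetD l i 0) &&
          decide (PySem.List.pyGetD l i 0 < 300) &&
          decide (PySem.Int.mod i 2 = (m : Int)))).map
        (fun i => PySem.List.pyGetD l i 0)).length : Int)
      = ((PySem.List.slice? l (some (m : Int)) none 2).getD []).foldl
          (fun acc x => acc + (if 100 ≤ x ∧ x < 300 then 1 else 0)) 0 := by
  rw [slice?_step2 l m, Option.getD_some, foldl_count, List.length_map,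
    ← List.countP_eq_length_filter, PySem.List.pyRange_one, List.countP_map]
  have hlen : (((l.length : Int) - 0).toNat) = l.length := by omega
  rw [hlen]
  have hpred : ∀ k ∈ List.range l.length,
      ((fun i : Int => decide (100 ≤ PySem.List.pyGetD l i 0) &&
          decide (PySem.List.pyGetD l i 0 < 300) &&
          decide (PySem.Int.mod i 2 = (m : Int))) ∘ (fun k : Nat => (0 : Int) + (k : Int))) k
        = (fun i => decide (100 ≤ l.getD i 0) && decide (l.getD i 0 < 300) && decide (i % 2 = m)) k := by
    intro k _
    simp only [Function.comp, zero_add, PySem.List.pyGetD_natCast]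
    congr 1
    rw [decide_eq_decide]
    simp [PySem.Int.mod, Int.fmod_eq_emod]
    omega
  rw [List.countP_congr (fun x hx => by rw [hpred x hx]), main_count l m hm]
  omega

-- ===== VERDICT (by name: the statement is the Claim_ definition above) =====
theorem count_mistakes_spec : Claim_equal_count_mistakes := by
  intro l white _
  unfold Spec_count_mistakes count_mistakes count_mistakes_alt
  cases white
  · simpa using ports_agree l 1 (Or.inr rfl)
  · simpa using ports_agree l 0 (Or.inl rfl)
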